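-- pv_equiv track=rewrite | github.com/adityasingh3738/PALB_PYTHON_PROGRAMMING | subarraywithfirstelementminimum.py | validSubarrays
-- ===== SOURCE A (Python) =====
-- def validSubarrays(nums):
--     n = len(nums)
--     stack = []
--     result = 0
--
--     for i in range(n):
--
--         while stack and nums[stack[-1]] > nums[i]:
--             idx = stack.pop()
--             result += i - idx
--
--         stack.append(i)
--
--     # Remaining elements extend till end
--     while stack:
--         idx = stack.pop()
--         result += n - idx
--
--     return result
-- ===== SOURCE B (Python) =====
-- def validSubarrays(nums):
--     n = len(nums)
--     result = 0
--     for i in range(n):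
--         cnt = 1
--         j = i + 1
--         while j < n and nums[j] >= nums[i]:
--             cnt += 1
--             j += 1
--         result += cnt
--     return result
-- ===== Notes on version B (the rewrite author's own statement) =====
-- stated objective: simpler
-- what changed: Replaced the monotonic-stack sweep by a direct nested right-scan: for each start index, scan right while elements are >= nums[i], counting them; no stack or deferred accounting.
import Mathlib
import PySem

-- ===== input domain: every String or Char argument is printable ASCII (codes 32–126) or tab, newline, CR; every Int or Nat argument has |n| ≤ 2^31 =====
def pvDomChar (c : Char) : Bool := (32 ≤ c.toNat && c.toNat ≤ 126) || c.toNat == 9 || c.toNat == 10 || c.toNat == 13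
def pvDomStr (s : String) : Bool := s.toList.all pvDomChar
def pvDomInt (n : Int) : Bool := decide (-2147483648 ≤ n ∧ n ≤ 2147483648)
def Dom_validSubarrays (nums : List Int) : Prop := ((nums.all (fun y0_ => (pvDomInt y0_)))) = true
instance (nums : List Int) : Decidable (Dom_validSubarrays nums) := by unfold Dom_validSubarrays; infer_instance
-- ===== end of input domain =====

-- B replaces A's monotonic stack by a direct nested right-scan per start index: simpler, no stack state (objective: simpler; not faster).

-- ===== PORT A =====
-- inner 'while stack and nums[stack[-1]] > nums[i]' loop; the stack is kept top-first
-- (head = Python's stack[-1]).  All indices are in range, so nums[...] is pyGetD with default 0.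
def popLoop (nums : List Int) (i : Int) (stack : List Int) (result : Int) :
    List Int × Int :=
  match stack with
  | [] => ([], result)
  | idx :: rest =>
    if PySem.List.pyGetD nums idx 0 > PySem.List.pyGetD nums i 0 then
      popLoop nums i rest (result + (i - idx))
    else (idx :: rest, result)

-- final 'while stack' loop
def finalLoop (n : Int) (stack : List Int) (result : Int) : Int :=
  match stack with
  | [] => result
  | idx :: rest => finalLoop n rest (result + (n - idx))

def validSubarrays (nums : List Int) : Int :=
  let n : Int := nums.length
  let st := (PySem.List.pyRange 0 n 1).foldl
    (fun (st : List Int × Int) (i : Int) =>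
      let pr := popLoop nums i st.1 st.2
      (i :: pr.1, pr.2)) ([], 0)
  finalLoop n st.1 st.2

-- ===== PORT B =====
-- inner 'while j < n and nums[j] >= nums[i]' loop, counting the accepted js
def scanCnt (nums : List Int) (x : Int) (j : Nat) : Int :=
  if _h : j < nums.length then
    if nums.getD j 0 ≥ x then 1 + scanCnt nums x (j + 1) else 0
  else 0
termination_by nums.length - j

def validSubarrays_alt (nums : List Int) : Int :=
  (List.range nums.length).foldl
    (fun result i => result + (1 + scanCnt nums (nums.getD i 0) (i + 1))) 0

-- ===== PRECONDITION & SPEC =====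
def Spec_validSubarrays (nums : List Int) (out : Int) : Prop := out = validSubarrays_alt nums
instance (nums : List Int) (out : Int) : Decidable (Spec_validSubarrays nums out) := by unfold Spec_validSubarrays; infer_instance

-- ===== CLAIM (what is proved, stated in full; the proofs are below) =====
def Claim_equal_validSubarrays : Prop := ∀ (nums : List Int), Dom_validSubarrays nums → Spec_validSubarrays nums (validSubarrays nums)

-- ===== LEMMAS AND PROOFS =====

-- index of the next element strictly smaller than x, at or after position j (length if none)
def nss (nums : List Int) (x : Int) (j : Nat) : Nat :=
  if _h : j < nums.length then
    if nums.getD j 0 < x then j else nss nums x (j + 1)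
  else nums.length
termination_by nums.length - j

-- what one start index contributes to the answer
def contrib (nums : List Int) (idx : Int) : Int :=
  (nss nums (nums.getD idx.toNat 0) (idx.toNat + 1) : Int) - idx

-- sum of contributions of the first i start indices
def psum (nums : List Int) (i : Nat) : Int :=
  ((List.range i).map (fun j => contrib nums (Int.ofNat j))).sum

theorem nss_eq_len (nums : List Int) (x : Int) (j : Nat)
    (h : ∀ k, j ≤ k → k < nums.length → x ≤ nums.getD k 0) : nss nums x j = nums.length := by
  fun_induction nss nums x j with
  | case1 j hl hx => exact absurd (h j le_rfl hl) (by omega)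
  | case2 j hl hx ih => exact ih (fun k hk1 hk2 => h k (by omega) hk2)
  | case3 => rfl

theorem nss_eq_of (nums : List Int) (x : Int) (j i : Nat) (hj : j ≤ i) (hi : i < nums.length)
    (hlt : nums.getD i 0 < x) (h : ∀ k, j ≤ k → k < i → x ≤ nums.getD k 0) :
    nss nums x j = i := by
  fun_induction nss nums x j with
  | case1 j hl hx =>
    by_contra hne
    have hji : j < i := by omega
    exact absurd (h j le_rfl hji) (by omega)
  | case2 j hl hx ih =>
    have hji : j ≠ i := by intro he; subst he; omega
    exact ih (by omega) (fun k hk1 hk2 => h k (by omega) hk2)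
  | case3 j hl => omega

theorem scanCnt_eq (nums : List Int) (x : Int) (j : Nat) (hj : j ≤ nums.length) :
    scanCnt nums x j = (nss nums x j : Int) - (j : Int) := by
  fun_induction scanCnt nums x j with
  | case1 j hl hx ih =>
    rw [ih (by omega)]
    conv_rhs => rw [nss]
    rw [dif_pos hl, if_neg (by omega)]
    push_cast; ring
  | case2 j hl hx =>
    conv_rhs => rw [nss]
    rw [dif_pos hl, if_pos (by omega)]
    simp
  | case3 j hl =>
    conv_rhs => rw [nss]
    rw [dif_neg hl]
    omega

theorem foldl_add_sum (g : Nat → Int) : ∀ (l : List Nat) (c : Int),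
    l.foldl (fun r i => r + g i) c = c + (l.map g).sum
  | [], c => by simp
  | x :: t, c => by
    simp only [List.foldl, List.map, List.sum_cons]
    rw [foldl_add_sum g t]
    ring

theorem alt_eq_psum (nums : List Int) : validSubarrays_alt nums = psum nums nums.length := by
  unfold validSubarrays_alt psum
  rw [foldl_add_sum (fun i => 1 + scanCnt nums (nums.getD i 0) (i + 1))]
  rw [zero_add]
  congr 1
  apply List.map_congr_left
  intro i hi
  rw [List.mem_range] at hi
  rw [scanCnt_eq nums _ (i + 1) (by omega)]
  unfold contrib
  simp
  omega

-- the invariant of A's main loop, after the first i iterations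
def StackInv (nums : List Int) (i : Nat) (stack : List Int) (result : Int) : Prop :=
  (∀ idx ∈ stack, 0 ≤ idx ∧ idx < (i : Int)) ∧
  stack.Pairwise (fun a b => b < a ∧ nums.getD b.toNat 0 ≤ nums.getD a.toNat 0) ∧
  (∀ idx ∈ stack, ∀ k : Nat, idx.toNat < k → k < i → nums.getD idx.toNat 0 ≤ nums.getD k 0) ∧
  result + (stack.map (contrib nums)).sum = psum nums i

theorem popLoop_lemma (nums : List Int) (i : Nat) (hi : i < nums.length)
    (stack : List Int) (result : Int)
    (hb : ∀ idx ∈ stack, 0 ≤ idx ∧ idx < (i : Int))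
    (hp : stack.Pairwise (fun a b => b < a ∧ nums.getD b.toNat 0 ≤ nums.getD a.toNat 0))
    (hw : ∀ idx ∈ stack, ∀ k : Nat, idx.toNat < k → k < i → nums.getD idx.toNat 0 ≤ nums.getD k 0) :
    (∀ idx ∈ (popLoop nums i stack result).1, 0 ≤ idx ∧ idx < (i : Int)) ∧
    (popLoop nums i stack result).1.Pairwise (fun a b => b < a ∧ nums.getD b.toNat 0 ≤ nums.getD a.toNat 0) ∧
    (∀ idx ∈ (popLoop nums i stack result).1, ∀ k : Nat, idx.toNat < k → k < i → nums.getD idx.toNat 0 ≤ nums.getD k 0) ∧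
    (∀ idx ∈ (popLoop nums i stack result).1, nums.getD idx.toNat 0 ≤ nums.getD i 0) ∧
    (popLoop nums i stack result).2 + ((popLoop nums i stack result).1.map (contrib nums)).sum
      = result + (stack.map (contrib nums)).sum := by
  induction stack generalizing result with
  | nil => simp [popLoop]
  | cons idx rest ih =>
    obtain ⟨hpos, hlt⟩ := hb idx (List.mem_cons_self ..)
    rw [List.pairwise_cons] at hp
    have hgidx : PySem.List.pyGetD nums idx 0 = nums.getD idx.toNat 0 := by
      have h1 : idx = ((idx.toNat : Nat) : Int) := by omega
      conv_lhs => rw [h1]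
      exact PySem.List.pyGetD_natCast ..
    have hgi : PySem.List.pyGetD nums ((i : Nat) : Int) 0 = nums.getD i 0 :=
      PySem.List.pyGetD_natCast ..
    rw [popLoop, hgidx, hgi]
    by_cases hc : nums.getD idx.toNat 0 > nums.getD i 0
    · rw [if_pos hc]
      have main := ih (result + ((i : Int) - idx))
        (fun x hx => hb x (List.mem_cons_of_mem _ hx)) hp.2
        (fun x hx => hw x (List.mem_cons_of_mem _ hx))
      refine ⟨main.1, main.2.1, main.2.2.1, main.2.2.2.1, ?_⟩
      rw [main.2.2.2.2]
      have hcon : contrib nums idx = (i : Int) - idx := by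
        unfold contrib
        rw [nss_eq_of nums (nums.getD idx.toNat 0) (idx.toNat + 1) i (by omega) hi hc
          (fun k hk1 hk2 => hw idx (List.mem_cons_self ..) k (by omega) hk2)]
      simp only [List.map_cons, List.sum_cons]
      rw [hcon]
      ring
    · rw [if_neg hc]
      refine ⟨hb, List.pairwise_cons.mpr hp, hw, ?_, rfl⟩
      intro x hx
      rcases List.mem_cons.mp hx with h | h
      · subst h; omega
      · have := (hp.1 x h).2
        omega

theorem main_inv (nums : List Int) (i : Nat) (hi : i ≤ nums.length) :
    StackInv nums i
      (((PySem.List.pyRange 0 i 1).foldl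
        (fun (st : List Int × Int) (j : Int) =>
          let pr := popLoop nums j st.1 st.2
          (j :: pr.1, pr.2)) ([], 0)).1)
      (((PySem.List.pyRange 0 i 1).foldl
        (fun (st : List Int × Int) (j : Int) =>
          let pr := popLoop nums j st.1 st.2
          (j :: pr.1, pr.2)) ([], 0)).2) := by
  induction i with
  | zero =>
    rw [PySem.List.pyRange_one_eq_nil (by simp)]
    simp [StackInv, psum]
  | succ i ih =>
    have hi : i < nums.length := by omega
    have hsplit : PySem.List.pyRange 0 ((i + 1 : Nat) : Int) 1
        = PySem.List.pyRange 0 (i : Int) 1 ++ [(i : Int)] := by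
      have : ((i + 1 : Nat) : Int) = (i : Int) + 1 := by push_cast; ring
      rw [this, PySem.List.pyRange_one_succ_right (by positivity)]
    rw [hsplit, List.foldl_append]
    obtain ⟨hb, hp, hw, hs⟩ := ih (by omega)
    set st := ((PySem.List.pyRange 0 (i : Int) 1).foldl
        (fun (st : List Int × Int) (j : Int) =>
          let pr := popLoop nums j st.1 st.2
          (j :: pr.1, pr.2)) ([], 0)) with hst
    simp only [List.foldl_cons, List.foldl_nil]
    have main := popLoop_lemma nums i hi st.1 st.2 hb hp hw
    refine ⟨?_, ?_, ?_, ?_⟩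
    · intro idx hidx
      rcases List.mem_cons.mp hidx with h | h
      · subst h; exact ⟨by positivity, by push_cast; omega⟩
      · have := main.1 idx h; push_cast; omega
    · rw [List.pairwise_cons]
      refine ⟨?_, main.2.1⟩
      intro b hbmem
      have h1 := main.1 b hbmem
      have h2 := main.2.2.2.1 b hbmem
      refine ⟨h1.2, ?_⟩
      have : ((i : Int)).toNat = i := by omega
      rw [this]
      exact h2
    · intro idx hidx k hk1 hk2
      rcases List.mem_cons.mp hidx with h | h
      · subst h
        have : ((i : Int)).toNat = i := by omega
        omega
      · have h1 := main.1 idx h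
        by_cases hki : k < i
        · exact main.2.2.1 idx h k hk1 hki
        · have hk : k = i := by omega
          subst hk
          exact main.2.2.2.1 idx h
    · simp only [List.map_cons, List.sum_cons]
      have hpsum : psum nums (i + 1) = psum nums i + contrib nums (Int.ofNat i) := by
        unfold psum
        rw [List.range_succ, List.map_append, List.sum_append]
        simp
      rw [hpsum, ← hs, ← main.2.2.2.2]
      have : contrib nums (Int.ofNat i) = contrib nums ((i : Nat) : Int) := rfl
      rw [this]
      ring

theorem finalLoop_eq (nums : List Int) (stack : List Int) (result : Int)
    (h : ∀ idx ∈ stack, contrib nums idx = (nums.length : Int) - idx) :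
    finalLoop (nums.length : Int) stack result = result + (stack.map (contrib nums)).sum := by
  induction stack generalizing result with
  | nil => simp [finalLoop]
  | cons idx rest ih =>
    rw [finalLoop, ih _ (fun x hx => h x (List.mem_cons_of_mem _ hx))]
    simp only [List.map_cons, List.sum_cons]
    rw [h idx (List.mem_cons_self ..)]
    ring

-- ===== VERDICT (by name: the statement is the Claim_ definition above) =====
theorem validSubarrays_spec : Claim_equal_validSubarrays := by
  intro nums _
  unfold Spec_validSubarrays
  obtain ⟨hb, hp, hw, hs⟩ := main_inv nums nums.length le_rfl
  simp only [validSubarrays]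
  rw [finalLoop_eq]
  · rw [hs, alt_eq_psum]
  · intro idx hidx
    obtain ⟨hpos, hlt⟩ := hb idx hidx
    unfold contrib
    rw [nss_eq_len nums (nums.getD idx.toNat 0) (idx.toNat + 1)
      (fun k hk1 hk2 => hw idx hidx k (by omega) hk2)]
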